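-- pv_equiv track=rewrite | github.com/MaksDrap/tests-for-checking-the-randomness-of-sequences-of-bits | Project.py | length_test
-- ===== SOURCE A (Python) =====
-- def length_test(sequence):
--     series_ones = [0] * 6
--     series_zeros = [0] * 6
--     current_series = 0
--     current_bit = None
--
--     for bit in sequence:
--         if bit == current_bit:
--             current_series += 1
--         else:
--             if current_bit == 1:
--                 if current_series >= 6:
--                     series_ones[5] += 1
--                 else:
--                     series_ones[current_series - 1] += 1
--             elif current_bit == 0:
--                 if current_series >= 6:
--                     series_zeros[5] += 1
--                 else:
--                     series_zeros[current_series - 1] += 1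
--
--             current_series = 1
--             current_bit = bit
--
--     if current_bit == 1:
--         if current_series >= 6:
--             series_ones[5] += 1
--         else:
--             series_ones[current_series - 1] += 1
--     elif current_bit == 0:
--         if current_series >= 6:
--             series_zeros[5] += 1
--         else:
--             series_zeros[current_series - 1] += 1
--
--     series_intervals = [(2267, 2733), (1079, 1421), (502, 748), (223, 402), (90, 223), (90, 223)]
--
--     for i, (start, end) in enumerate(series_intervals):
--         if series_ones[i] < start or series_ones[i] > end or series_zeros[i] < start or series_zeros[i] > end:
--             return False
--
--     return True
-- ===== SOURCE B (Python) =====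
-- def length_test(sequence):
--     n = len(sequence)
--
--     # Stage 1: positions where a new run begins (boundary detection by index).
--     starts = [i for i in range(n) if i == 0 or sequence[i] != sequence[i - 1]]
--
--     # Stage 2: one dict counter keyed by (bit, capped run length).
--     counts = {}
--     for s, e in zip(starts, starts[1:] + [n]):
--         key = (sequence[s], min(e - s, 6))
--         counts[key] = counts.get(key, 0) + 1
--
--     # Stage 3: read the histogram out of the counter while checking the intervals.
--     intervals = [(2267, 2733), (1079, 1421), (502, 748), (223, 402), (90, 223), (90, 223)]
--     for L, (lo, hi) in enumerate(intervals, start=1):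
--         ones = counts.get((1, L), 0)
--         zeros = counts.get((0, L), 0)
--         if not (lo <= ones <= hi and lo <= zeros <= hi):
--             return False
--     return True
-- ===== Notes on version B (the rewrite author's own statement) =====
-- stated objective: alternative
-- what changed: B replaces A's per-element current_bit/current_series state machine with its duplicated flush and two fixed histogram arrays by staged passes: run-start indices found by comparing sequence[i] with sequence[i-1], a single dict counter keyed by (bit, capped run length) built from the zipped boundary pairs, and an interval loop that reads the counter directly instead of indexing histogram lists.
import Mathlib
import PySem

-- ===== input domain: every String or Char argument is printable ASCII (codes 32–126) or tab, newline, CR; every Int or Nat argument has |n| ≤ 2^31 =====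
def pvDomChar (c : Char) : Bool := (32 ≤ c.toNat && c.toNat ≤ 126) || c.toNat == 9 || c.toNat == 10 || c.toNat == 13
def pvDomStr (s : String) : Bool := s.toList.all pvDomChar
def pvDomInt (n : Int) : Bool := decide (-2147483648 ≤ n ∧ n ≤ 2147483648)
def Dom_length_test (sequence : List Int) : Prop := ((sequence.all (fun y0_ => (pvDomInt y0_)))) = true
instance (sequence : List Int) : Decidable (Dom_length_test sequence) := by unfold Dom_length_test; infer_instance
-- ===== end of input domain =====

-- B replaces the per-element state machine by staged passes: boundary indices found by
-- index comparison, one dict counter keyed by (bit, capped run length), and interval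
-- checks that read the counter directly. Same cost; a different decomposition.

-- ===== PORT A =====
-- l[i] += 1 with Python indexing (index is always in range here; pySetD/pyGetD totalize)
def pvInc (l : List Int) (i : Int) : List Int :=
  PySem.List.pySetD l i (PySem.List.pyGetD l i 0 + 1)

-- the duplicated flush of A (inside the loop on a bit change, and after the loop)
def pvFlushA (ones zeros : List Int) (cb : Option Int) (cs : Int) : List Int × List Int :=
  if cb = some 1 then
    (if cs ≥ 6 then pvInc ones 5 else pvInc ones (cs - 1), zeros)
  else if cb = some 0 then
    (ones, if cs ≥ 6 then pvInc zeros 5 else pvInc zeros (cs - 1))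
  else (ones, zeros)

def pvStepA (st : List Int × List Int × Int × Option Int) (bit : Int) :
    List Int × List Int × Int × Option Int :=
  if some bit = st.2.2.2 then (st.1, st.2.1, st.2.2.1 + 1, st.2.2.2)
  else
    let fz := pvFlushA st.1 st.2.1 st.2.2.2 st.2.2.1
    (fz.1, fz.2, 1, some bit)

-- A's early-return check loop over enumerate(series_intervals)
def pvCheckA (ones zeros : List Int) (i : Int) : List (Int × Int) → Bool
  | [] => true
  | (s, e) :: rest =>
    if PySem.List.pyGetD ones i 0 < s || PySem.List.pyGetD ones i 0 > e ||
       PySem.List.pyGetD zeros i 0 < s || PySem.List.pyGetD zeros i 0 > e then false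
    else pvCheckA ones zeros (i + 1) rest

def pvIntervals : List (Int × Int) :=
  [(2267, 2733), (1079, 1421), (502, 748), (223, 402), (90, 223), (90, 223)]

def length_test (sequence : List Int) : Bool :=
  let st := sequence.foldl pvStepA (List.replicate 6 0, List.replicate 6 0, 0, none)
  let fz := pvFlushA st.1 st.2.1 st.2.2.2 st.2.2.1
  pvCheckA fz.1 fz.2 0 pvIntervals

-- ===== PORT B =====
-- Source B's boundary predicate: i == 0 or sequence[i] != sequence[i-1]
-- (sequence[i] and sequence[i-1] are always in range when tested; pyGetD is exact here)
def pvIsStart (seq : List Int) (i : Int) : Bool :=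
  i == 0 || !(PySem.List.pyGetD seq i 0 == PySem.List.pyGetD seq (i - 1) 0)

-- Source B's dict key for a run delimited by [s, e)
def pvKey (seq : List Int) (p : Int × Int) : Int × Int :=
  (PySem.List.pyGetD seq p.1 0, min (p.2 - p.1) 6)

-- Source B's final loop over enumerate(intervals, start=1), reading the counter
def pvCheckB (counts : PySem.Dict (Int × Int) Int) (L : Int) : List (Int × Int) → Bool
  | [] => true
  | (lo, hi) :: rest =>
    let ones := counts.getD (1, L) 0
    let zeros := counts.getD (0, L) 0
    if lo ≤ ones && ones ≤ hi && lo ≤ zeros && zeros ≤ hi then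
      pvCheckB counts (L + 1) rest
    else false

def length_test_alt (sequence : List Int) : Bool :=
  let n : Int := sequence.length
  let starts := (PySem.List.pyRange 0 n 1).filter (pvIsStart sequence)
  let counts := (starts.zip (PySem.List.slice starts (some 1) none ++ [n])).foldl
    (fun d p => d.insert (pvKey sequence p) (d.getD (pvKey sequence p) 0 + 1))
    PySem.Dict.empty
  pvCheckB counts 1 pvIntervals

-- ===== PRECONDITION & SPEC =====
def Spec_length_test (sequence : List Int) (out : Bool) : Prop := out = length_test_alt sequence
instance (sequence : List Int) (out : Bool) : Decidable (Spec_length_test sequence out) := by unfold Spec_length_test; infer_instance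

-- ===== CLAIM (what is proved, stated in full; the proofs are below) =====
def Claim_equal_length_test : Prop := ∀ (sequence : List Int), Dom_length_test sequence → Spec_length_test sequence (length_test sequence)

-- ===== LEMMAS AND PROOFS =====

-- the runs of the sequence as (key, length) pairs: the common yardstick of the proof
def pvRunsAux (k : Int) (n : Int) : List Int → List (Int × Int)
  | [] => [(k, n)]
  | y :: ys => if y = k then pvRunsAux k (n + 1) ys else (k, n) :: pvRunsAux y 1 ys

-- a run's (key, capped length), i.e. the dict key B files it under
def pvCap (r : Int × Int) : Int × Int := (r.1, min r.2 6)

-- bucketing one run into A's two histograms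
def pvBump (st : List Int × List Int) (r : Int × Int) : List Int × List Int :=
  let idx := (min r.2 6 - 1).toNat
  if r.1 = 1 then (st.1.set idx (st.1.getD idx 0 + 1), st.2)
  else if r.1 = 0 then (st.1, st.2.set idx (st.2.getD idx 0 + 1))
  else st

-- the start indices strictly after position off-1, given the suffix and the previous element
def pvS (prev : Int) : List Int → Int → List Int
  | [], _ => []
  | y :: ys, off => if y == prev then pvS y ys (off + 1) else off :: pvS y ys (off + 1)

theorem pvFlush_eq_bump (ones zeros : List Int) (k n : Int) (hn : 1 ≤ n) :
    pvFlushA ones zeros (some k) n = pvBump (ones, zeros) (k, n) := by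
  have hidx : ((min n 6 - 1).toNat) = if n ≥ 6 then 5 else (n - 1).toNat := by
    split <;> omega
  have hT : (n - 1).toNat = n.toNat - 1 := by omega
  have hset : ∀ (l : List Int), PySem.List.pySetD l (n - 1) (PySem.List.pyGetD l (n - 1) 0 + 1) =
      l.set (n.toNat - 1) (l[n.toNat - 1]?.getD 0 + 1) := by
    intro l
    rw [PySem.List.pySetD_of_nonneg _ _ (by omega), PySem.List.pyGetD_of_nonneg _ _ (by omega), hT, List.getD_eq_getElem?_getD]
  unfold pvFlushA pvBump pvInc
  by_cases h6 : n ≥ 6 <;>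
  by_cases h1 : k = 1 <;>
  by_cases h0 : k = 0 <;>
    simp [h6, h1, h0, hidx, hset, PySem.List.pySetD_of_nonneg, PySem.List.pyGetD_of_nonneg]

theorem pvLoop_eq_runs (xs : List Int) (ones zeros : List Int) (k n : Int) (hn : 1 ≤ n) :
    (let st := xs.foldl pvStepA (ones, zeros, n, some k)
     pvFlushA st.1 st.2.1 st.2.2.2 st.2.2.1) = (pvRunsAux k n xs).foldl pvBump (ones, zeros) := by
  induction xs generalizing ones zeros k n with
  | nil => simpa [pvRunsAux] using pvFlush_eq_bump ones zeros k n hn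
  | cons y ys ih =>
    by_cases h : y = k
    · subst h
      simpa [pvStepA, pvRunsAux] using ih ones zeros y (n + 1) (by omega)
    · have hb := pvFlush_eq_bump ones zeros k n hn
      have := ih (pvBump (ones, zeros) (k, n)).1 (pvBump (ones, zeros) (k, n)).2 y 1 (by omega)
      simpa [pvStepA, pvRunsAux, h, hb] using this

-- run lengths produced by pvRunsAux are ≥ 1
theorem pvRuns_pos (l : List Int) (k n : Int) (hn : 1 ≤ n) :
    ∀ r ∈ pvRunsAux k n l, 1 ≤ r.2 := by
  induction l generalizing k n with
  | nil => simp [pvRunsAux]; omega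
  | cons y ys ih =>
    intro r hr
    unfold pvRunsAux at hr
    split at hr
    · exact ih _ _ (by omega) r hr
    · rcases List.mem_cons.mp hr with h | h
      · subst h; exact hn
      · exact ih _ 1 le_rfl r h

-- A's histogram entries count the capped runs
theorem pvFold_bump_count (rs : List (Int × Int)) (hrs : ∀ r ∈ rs, 1 ≤ r.2)
    (o z : List Int) (ho : o.length = 6) (hz : z.length = 6) (k : Nat) (hk : k < 6) :
    ((rs.foldl pvBump (o, z)).1.getD k 0 = o.getD k 0 + (rs.map pvCap).count (1, (k : Int) + 1)) ∧
    ((rs.foldl pvBump (o, z)).2.getD k 0 = z.getD k 0 + (rs.map pvCap).count (0, (k : Int) + 1)) := by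
  induction rs generalizing o z with
  | nil => simp
  | cons r rs ih =>
    obtain ⟨rb, rc⟩ := r
    have hr1 : 1 ≤ rc := hrs (rb, rc) (by simp)
    have hb1 : (pvBump (o, z) (rb, rc)).1.length = 6 := by
      unfold pvBump; split_ifs <;> simp [ho]
    have hb2 : (pvBump (o, z) (rb, rc)).2.length = 6 := by
      unfold pvBump; split_ifs <;> simp [hz]
    obtain ⟨ih1, ih2⟩ := ih (fun r' h => hrs r' (List.mem_cons_of_mem _ h))
      (pvBump (o, z) (rb, rc)).1 (pvBump (o, z) (rb, rc)).2 hb1 hb2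
    have hfold : ((rb, rc) :: rs).foldl pvBump (o, z)
        = rs.foldl pvBump ((pvBump (o, z) (rb, rc)).1, (pvBump (o, z) (rb, rc)).2) := by simp
    have hgo : ∀ (l : List Int), l.length = 6 →
        (l.set (min rc 6 - 1).toNat (l.getD (min rc 6 - 1).toNat 0 + 1)).getD k 0
          = l.getD k 0 + (if min rc 6 = (k : Int) + 1 then 1 else 0) := by
      intro l hl
      simp only [List.getD_eq_getElem?_getD, List.getElem?_set]
      by_cases hk2 : (min rc 6 - 1).toNat = k
      · have hmm : min rc 6 = (k : Int) + 1 := by omega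
        rw [if_pos hk2, if_pos (by omega : (min rc 6 - 1).toNat < l.length), if_pos hmm, hk2]
        simp
      · have hmm : ¬ (min rc 6 = (k : Int) + 1) := by omega
        rw [if_neg hk2, if_neg hmm, add_zero]
    have key1 : (pvBump (o, z) (rb, rc)).1.getD k 0
        = o.getD k 0 + (if pvCap (rb, rc) = ((1 : Int), (k : Int) + 1) then 1 else 0) := by
      by_cases h1 : rb = 1
      · subst h1
        have hb : pvBump (o, z) (1, rc)
            = (o.set (min rc 6 - 1).toNat (o.getD (min rc 6 - 1).toNat 0 + 1), z) := by
          simp [pvBump]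
        rw [hb]
        simp only [hgo o ho]
        by_cases hc : min rc 6 = (k : Int) + 1 <;> simp [pvCap, Prod.ext_iff, hc]
      · have hb : (pvBump (o, z) (rb, rc)).1 = o := by
          unfold pvBump; rw [if_neg (by simpa using h1)]; split_ifs <;> rfl
        have hne : pvCap (rb, rc) ≠ ((1 : Int), (k : Int) + 1) := by
          simp only [pvCap, ne_eq, Prod.mk.injEq, not_and]; intro h _; exact h1 h
        rw [hb, if_neg hne, add_zero]
    have key2 : (pvBump (o, z) (rb, rc)).2.getD k 0
        = z.getD k 0 + (if pvCap (rb, rc) = ((0 : Int), (k : Int) + 1) then 1 else 0) := by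
      by_cases h0 : rb = 0
      · subst h0
        have hb : pvBump (o, z) (0, rc)
            = (o, z.set (min rc 6 - 1).toNat (z.getD (min rc 6 - 1).toNat 0 + 1)) := by
          simp [pvBump]
        rw [hb]
        simp only [hgo z hz]
        by_cases hc : min rc 6 = (k : Int) + 1 <;> simp [pvCap, Prod.ext_iff, hc]
      · have hb : (pvBump (o, z) (rb, rc)).2 = z := by
          unfold pvBump; split_ifs <;> rfl
        have hne : pvCap (rb, rc) ≠ ((0 : Int), (k : Int) + 1) := by
          simp only [pvCap, ne_eq, Prod.mk.injEq, not_and]; intro h _; exact h0 h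
        rw [hb, if_neg hne, add_zero]
    refine ⟨?_, ?_⟩
    · rw [hfold, ih1, key1, List.map_cons, List.count_cons]
      by_cases hc : pvCap (rb, rc) = ((1 : Int), (k : Int) + 1)
      · simp [hc]; ring
      · simp [hc]
    · rw [hfold, ih2, key2, List.map_cons, List.count_cons]
      by_cases hc : pvCap (rb, rc) = ((0 : Int), (k : Int) + 1)
      · simp [hc]; ring
      · simp [hc]

-- the filtered range from off ≥ 1 is pvS of the suffix
theorem pvStarts_eq (l : List Int) : ∀ (seq : List Int) (off prev : Int),
    1 ≤ off → seq.drop off.toNat = l → PySem.List.pyGetD seq (off - 1) 0 = prev →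
    (PySem.List.pyRange off (seq.length : Int) 1).filter (pvIsStart seq) = pvS prev l off := by
  induction l with
  | nil =>
    intro seq off prev h1 hd hp
    have hle : (seq.length : Int) ≤ off := by
      have := List.drop_eq_nil_iff.mp hd
      omega
    rw [PySem.List.pyRange_one_eq_nil hle]
    rfl
  | cons y ys ih =>
    intro seq off prev h1 hd hp
    have hlen : off.toNat < seq.length := by
      by_contra h
      rw [List.drop_eq_nil_of_le (by omega)] at hd
      exact List.cons_ne_nil _ _ hd.symm
    have hlt : off < (seq.length : Int) := by omega
    have hy : PySem.List.pyGetD seq off 0 = y := by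
      rw [PySem.List.pyGetD_of_nonneg _ _ (by omega)]
      have h0 : seq[off.toNat]? = some y := by
        have h := List.getElem?_drop (xs := seq) (i := off.toNat) (j := 0)
        rw [hd] at h
        simpa using h.symm
      simp [List.getD_eq_getElem?_getD, h0]
    have hstart : pvIsStart seq off = !(y == prev) := by
      unfold pvIsStart
      rw [hy, hp]
      have h0 : (off == 0) = false := by simp; omega
      rw [h0, Bool.false_or]
    have hd' : seq.drop (off + 1).toNat = ys := by
      have he : (off + 1).toNat = off.toNat + 1 := by omega
      rw [he, ← List.tail_drop, hd]
      rfl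
    have hp' : PySem.List.pyGetD seq (off + 1 - 1) 0 = y := by
      simpa using hy
    rw [PySem.List.pyRange_one_cons hlt, List.filter_cons]
    by_cases hyp : y = prev
    · subst hyp
      rw [hstart]
      simp only [beq_self_eq_true, Bool.not_true, Bool.false_eq_true, if_false, pvS,
        beq_self_eq_true, if_true]
      exact ih seq (off + 1) y (by omega) hd' hp'
    · rw [hstart]
      have hb : (y == prev) = false := by simpa using hyp
      simp only [hb, Bool.not_false, if_true, pvS, Bool.false_eq_true, if_false]
      rw [ih seq (off + 1) y (by omega) hd' hp']

-- zipped boundary pairs, mapped through the dict key, are the capped runs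
theorem pvPairs_eq (l : List Int) : ∀ (seq : List Int) (off c prev : Int),
    0 ≤ c → c < off → off ≤ (seq.length : Int) →
    seq.drop off.toNat = l →
    PySem.List.pyGetD seq (off - 1) 0 = prev →
    PySem.List.pyGetD seq c 0 = prev →
    ((c :: pvS prev l off).zip (pvS prev l off ++ [(seq.length : Int)])).map (pvKey seq)
      = (pvRunsAux prev (off - c) l).map pvCap := by
  induction l with
  | nil =>
    intro seq off c prev hc hco hon hd hp hcv
    have hlen : (seq.length : Int) = off := by
      have := List.drop_eq_nil_iff.mp hd; omega
    simp [pvS, pvRunsAux, pvKey, pvCap, hlen, hcv]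
  | cons y ys ih =>
    intro seq off c prev hc hco hon hd hp hcv
    have hlen : off.toNat < seq.length := by
      by_contra h
      rw [List.drop_eq_nil_of_le (by omega)] at hd
      exact List.cons_ne_nil _ _ hd.symm
    have hy : PySem.List.pyGetD seq off 0 = y := by
      rw [PySem.List.pyGetD_of_nonneg _ _ (by omega)]
      have h0 : seq[off.toNat]? = some y := by
        have h := List.getElem?_drop (xs := seq) (i := off.toNat) (j := 0)
        rw [hd] at h
        simpa using h.symm
      simp [List.getD_eq_getElem?_getD, h0]
    have hd' : seq.drop (off + 1).toNat = ys := by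
      have he : (off + 1).toNat = off.toNat + 1 := by omega
      rw [he, ← List.tail_drop, hd]; rfl
    have hp' : PySem.List.pyGetD seq (off + 1 - 1) 0 = y := by simpa using hy
    by_cases hyp : y = prev
    · subst hyp
      have e1 : pvS y (y :: ys) off = pvS y ys (off + 1) := by simp [pvS]
      have e2 : pvRunsAux y (off - c) (y :: ys) = pvRunsAux y (off - c + 1) ys := by
        simp [pvRunsAux]
      have e3 : off - c + 1 = off + 1 - c := by ring
      rw [e1, e2, e3]
      exact ih seq (off + 1) c y hc (by omega) (by omega) hd' hp' hcv
    · have e1 : pvS prev (y :: ys) off = off :: pvS y ys (off + 1) := by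
        simp [pvS, hyp]
      have e2 : pvRunsAux prev (off - c) (y :: ys) = (prev, off - c) :: pvRunsAux y 1 ys := by
        simp [pvRunsAux, hyp]
      rw [e1, e2]
      simp only [List.cons_append, List.zip_cons_cons, List.map_cons]
      congr 1
      · simp [pvKey, pvCap, hcv]
      · have h := ih seq (off + 1) off y (by omega) (by omega) (by omega) hd' hp' hy
        rwa [show off + 1 - off = (1 : Int) by ring] at h

-- reading A's check and B's check off the same run-count function
theorem pvCheck_bridge (o z : List Int) (counts : PySem.Dict (Int × Int) Int)
    (cnt : Int × Int → Int)
    (ho : ∀ k : Nat, k < 6 → o.getD k 0 = cnt (1, (k : Int) + 1))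
    (hz : ∀ k : Nat, k < 6 → z.getD k 0 = cnt (0, (k : Int) + 1))
    (hc : ∀ p : Int × Int, counts.getD p 0 = cnt p) :
    pvCheckA o z 0 pvIntervals = pvCheckB counts 1 pvIntervals := by
  have o1 : o[0]?.getD 0 = cnt (1, 1) := by simpa [List.getD_eq_getElem?_getD] using ho 0 (by norm_num)
  have o2 : o[1]?.getD 0 = cnt (1, 2) := by simpa [List.getD_eq_getElem?_getD] using ho 1 (by norm_num)
  have o3 : o[2]?.getD 0 = cnt (1, 3) := by simpa [List.getD_eq_getElem?_getD] using ho 2 (by norm_num)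
  have o4 : o[3]?.getD 0 = cnt (1, 4) := by simpa [List.getD_eq_getElem?_getD] using ho 3 (by norm_num)
  have o5 : o[4]?.getD 0 = cnt (1, 5) := by simpa [List.getD_eq_getElem?_getD] using ho 4 (by norm_num)
  have o6 : o[5]?.getD 0 = cnt (1, 6) := by simpa [List.getD_eq_getElem?_getD] using ho 5 (by norm_num)
  have z1 : z[0]?.getD 0 = cnt (0, 1) := by simpa [List.getD_eq_getElem?_getD] using hz 0 (by norm_num)
  have z2 : z[1]?.getD 0 = cnt (0, 2) := by simpa [List.getD_eq_getElem?_getD] using hz 1 (by norm_num)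
  have z3 : z[2]?.getD 0 = cnt (0, 3) := by simpa [List.getD_eq_getElem?_getD] using hz 2 (by norm_num)
  have z4 : z[3]?.getD 0 = cnt (0, 4) := by simpa [List.getD_eq_getElem?_getD] using hz 3 (by norm_num)
  have z5 : z[4]?.getD 0 = cnt (0, 5) := by simpa [List.getD_eq_getElem?_getD] using hz 4 (by norm_num)
  have z6 : z[5]?.getD 0 = cnt (0, 6) := by simpa [List.getD_eq_getElem?_getD] using hz 5 (by norm_num)
  norm_num [pvCheckA, pvCheckB, pvIntervals, PySem.List.pyGetD_ofNat',
    o1, o2, o3, o4, o5, o6, z1, z2, z3, z4, z5, z6, hc]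
  rw [Bool.eq_iff_iff]
  simp [not_lt]

-- ===== VERDICT (by name: the statement is the Claim_ definition above) =====
theorem length_test_spec : Claim_equal_length_test := by
  unfold Claim_equal_length_test Spec_length_test
  intro seq _
  cases seq with
  | nil => decide
  | cons x xs =>
    have hrspos : ∀ r ∈ pvRunsAux x 1 xs, 1 ≤ r.2 := pvRuns_pos xs x 1 le_rfl
    have hstep : pvStepA (List.replicate 6 0, List.replicate 6 0, 0, none) x
        = (List.replicate 6 0, List.replicate 6 0, 1, some x) := by
      simp [pvStepA, pvFlushA]
    have hrun := pvLoop_eq_runs xs (List.replicate 6 0) (List.replicate 6 0) x 1 (by omega)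
    simp only [] at hrun
    have hpos : (0 : Int) < (((x :: xs).length : Nat) : Int) := by
      simp
    have hx0 : PySem.List.pyGetD (x :: xs) 0 0 = x := by
      norm_num [PySem.List.pyGetD_ofNat']
    have hstarts : (PySem.List.pyRange 0 ((x :: xs).length : Int) 1).filter (pvIsStart (x :: xs))
        = 0 :: pvS x xs 1 := by
      rw [PySem.List.pyRange_one_cons hpos, List.filter_cons]
      have h0 : pvIsStart (x :: xs) 0 = true := by simp [pvIsStart]
      rw [h0, if_pos rfl]
      congr 1
      rw [show (0 : Int) + 1 = 1 by norm_num]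
      exact pvStarts_eq xs (x :: xs) 1 x (by norm_num) (by norm_num)
        (by norm_num [PySem.List.pyGetD_ofNat'])
    have hpairs : ((0 :: pvS x xs 1).zip (pvS x xs 1 ++ [((x :: xs).length : Int)])).map (pvKey (x :: xs))
        = (pvRunsAux x 1 xs).map pvCap := by
      have h := pvPairs_eq xs (x :: xs) 1 0 x le_rfl (by norm_num) (by exact_mod_cast hpos)
        (by norm_num) (by norm_num [PySem.List.pyGetD_ofNat']) hx0
      rwa [show (1 : Int) - 0 = 1 by norm_num] at h
    have hcnt : ∀ p : Int × Int,
        (((0 :: pvS x xs 1).zip (pvS x xs 1 ++ [((x :: xs).length : Int)])).foldl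
          (fun d p => d.insert (pvKey (x :: xs) p) (d.getD (pvKey (x :: xs) p) 0 + 1))
          PySem.Dict.empty).getD p 0
        = ((((pvRunsAux x 1 xs).map pvCap).count p : Nat) : Int) := by
      intro p
      rw [← List.foldl_map (f := pvKey (x :: xs))
        (g := fun d x => PySem.Dict.insert d x (d.getD x 0 + 1)), hpairs,
        PySem.Dict.getD_foldl_insert_add_one, PySem.Dict.getD_empty, zero_add]
    have hok : ∀ k : Nat, k < 6 →
        ((pvRunsAux x 1 xs).foldl pvBump (List.replicate 6 0, List.replicate 6 0)).1.getD k 0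
          = ((((pvRunsAux x 1 xs).map pvCap).count (1, (k : Int) + 1) : Nat) : Int) := by
      intro k hk
      have h := (pvFold_bump_count (pvRunsAux x 1 xs) hrspos
        (List.replicate 6 0) (List.replicate 6 0) (by simp) (by simp) k hk).1
      rwa [List.getD_replicate 0 hk, zero_add] at h
    have hoz : ∀ k : Nat, k < 6 →
        ((pvRunsAux x 1 xs).foldl pvBump (List.replicate 6 0, List.replicate 6 0)).2.getD k 0
          = ((((pvRunsAux x 1 xs).map pvCap).count (0, (k : Int) + 1) : Nat) : Int) := by
      intro k hk
      have h := (pvFold_bump_count (pvRunsAux x 1 xs) hrspos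
        (List.replicate 6 0) (List.replicate 6 0) (by simp) (by simp) k hk).2
      rwa [List.getD_replicate 0 hk, zero_add] at h
    unfold length_test length_test_alt
    simp only [List.foldl_cons, hstep, hrun, hstarts, PySem.List.slice_from_one, List.tail_cons]
    exact pvCheck_bridge _ _ _ (fun p => ((((pvRunsAux x 1 xs).map pvCap).count p : Nat) : Int))
      hok hoz hcnt
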